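-- pv_equiv track=rewrite | github.com/suzuki-akira3/token | mytokenizer/splitword.py | splitbyblacket2
-- ===== SOURCE A (Python) =====
-- def splitbyblacket2(dic):
--     tokenlist = []
--     text = list(dic.values())[0]
--     blacs = '\u0028\u005B\u003C\u2039\u27E8\u3008'  # ( [  #〈  003C(<) 2039(‹) 27E8(⟨) 3008(〈)
--     blace = '\u005D\u0029\u003E\u203A\u27E9\u3009'  # ) ]  # 〉 003E(>) 203A(›) 27E9(⟩) 3009(〉)
--     blac = blacs + blace
--
--     index = []
--     tx = []
--     for i, t in enumerate(text):
--         if t in blacs: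
--             tokenlist += [{'BL1': t}]
--             index += [i]
--         elif t in blace:
--             tokenlist += [{'BL2': t}]
--             index += [i]
--         else:
--             tx += t
--             if i < len(text) - 1:
--                 if text[i + 1] in blac:
--                     tokenlist += [{'TK': ''.join(tx)}]
--                     tx = ''
--             else:
--                 tokenlist += [{'TK': ''.join(tx)}]
--     return tokenlist
-- ===== SOURCE B (Python) =====
-- def splitbyblacket2(dic):
--     # single pass with a buffer: flush the pending token before each bracket
--     text = list(dic.values())[0]
--     opening = '\u0028\u005B\u003C\u2039\u27E8\u3008'
--     closing = '\u0029\u005D\u003E\u203A\u27E9\u3009'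
--     out = []
--     buf = ''
--     for ch in text:
--         if ch in opening:
--             if buf:
--                 out.append({'TK': buf})
--                 buf = ''
--             out.append({'BL1': ch})
--         elif ch in closing:
--             if buf:
--                 out.append({'TK': buf})
--                 buf = ''
--             out.append({'BL2': ch})
--         else:
--             buf += ch
--     if buf:
--         out.append({'TK': buf})
--     return out
-- ===== Notes on version B (the rewrite author's own statement) =====
-- stated objective: simpler
-- what changed: replaces the index-based lookahead (peeking at text[i+1] to decide whether to flush the pending token) by a plain buffered single pass that flushes the buffer just before emitting each bracket token and once after the loop
-- outside the precondition, e.g. on splitbyblacket2({}): A raises IndexError, B raises IndexError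
import Mathlib
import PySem

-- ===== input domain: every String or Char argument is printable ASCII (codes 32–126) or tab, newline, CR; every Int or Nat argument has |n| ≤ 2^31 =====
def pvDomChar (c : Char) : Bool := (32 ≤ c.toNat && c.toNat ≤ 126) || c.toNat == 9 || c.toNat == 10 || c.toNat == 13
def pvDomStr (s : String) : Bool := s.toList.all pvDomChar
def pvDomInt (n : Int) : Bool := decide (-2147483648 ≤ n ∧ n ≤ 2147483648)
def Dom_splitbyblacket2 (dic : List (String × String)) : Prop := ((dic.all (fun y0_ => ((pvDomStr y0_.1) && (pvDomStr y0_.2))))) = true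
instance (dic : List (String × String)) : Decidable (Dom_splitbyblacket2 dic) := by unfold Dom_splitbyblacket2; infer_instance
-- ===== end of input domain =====

-- B replaces A's index-based lookahead ("flush the token when text[i+1] is a bracket")
-- by a buffered single pass that flushes just before each bracket and once after the loop (objective: simpler).

-- ===== PORT A =====
def pvBlacsA : List Char := ['\u0028', '\u005B', '\u003C', '\u2039', '\u27E8', '\u3008']
def pvBlaceA : List Char := ['\u005D', '\u0029', '\u003E', '\u203A', '\u27E9', '\u3009']
def pvBlacA : List Char := pvBlacsA ++ pvBlaceA

def pvStepA (cs : List Char)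
    (st : List (List (String × String)) × List Int × List Char) (p : Int × Char) :
    List (List (String × String)) × List Int × List Char :=
  if p.2 ∈ pvBlacsA then
    (st.1 ++ [[("BL1", String.mk [p.2])]], st.2.1 ++ [p.1], st.2.2)
  else if p.2 ∈ pvBlaceA then
    (st.1 ++ [[("BL2", String.mk [p.2])]], st.2.1 ++ [p.1], st.2.2)
  else
    let tx := st.2.2 ++ [p.2]
    if p.1 < (cs.length : Int) - 1 then
      if (PySem.List.pyGet? cs (p.1 + 1)).any (fun n => decide (n ∈ pvBlacA)) then
        (st.1 ++ [[("TK", String.mk tx)]], st.2.1, [])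
      else (st.1, st.2.1, tx)
    else (st.1 ++ [[("TK", String.mk tx)]], st.2.1, tx)

def splitbyblacket2 (dic : List (String × String)) : List (List (String × String)) :=
  match PySem.List.pyGet? (PySem.Dict.ofList dic).values 0 with
  | none => []   -- list(dic.values())[0] raises IndexError here; excluded by Pre_
  | some text =>
    let cs := text.toList
    (List.foldl (pvStepA cs) ([], [], []) (PySem.List.enumerate cs 0)).1

-- ===== PORT B =====
def pvOpenB : List Char := "\u0028\u005B\u003C\u2039\u27E8\u3008".toList
def pvCloseB : List Char := "\u0029\u005D\u003E\u203A\u27E9\u3009".toList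

def pvFlushB (out : List (List (String × String))) (buf : List Char) :
    List (List (String × String)) :=
  if buf = [] then out else out ++ [[("TK", String.mk buf)]]

def pvStepB (st : List (List (String × String)) × List Char) (c : Char) :
    List (List (String × String)) × List Char :=
  if c ∈ pvOpenB then (pvFlushB st.1 st.2 ++ [[("BL1", String.mk [c])]], [])
  else if c ∈ pvCloseB then (pvFlushB st.1 st.2 ++ [[("BL2", String.mk [c])]], [])
  else (st.1, st.2 ++ [c])

def splitbyblacket2_alt (dic : List (String × String)) : List (List (String × String)) :=
  match PySem.List.pyGet? (PySem.Dict.ofList dic).values 0 with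
  | none => []   -- same IndexError; excluded by Pre_
  | some text =>
    let r := List.foldl pvStepB ([], []) text.toList
    pvFlushB r.1 r.2

-- ===== PRECONDITION & SPEC =====
-- Pre_ excludes only the empty dict, on which Python A raises IndexError at list(dic.values())[0].
def Pre_splitbyblacket2 (dic : List (String × String)) : Prop := dic ≠ []
instance (dic : List (String × String)) : Decidable (Pre_splitbyblacket2 dic) := by
  unfold Pre_splitbyblacket2; infer_instance

def pvWitness_splitbyblacket2 : (List (String × String)) := [("text", "ab(cd)e")]

def Spec_splitbyblacket2 (dic : List (String × String)) (out : List (List (String × String))) : Prop := out = splitbyblacket2_alt dic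
instance (dic : List (String × String)) (out : List (List (String × String))) : Decidable (Spec_splitbyblacket2 dic out) := by unfold Spec_splitbyblacket2; infer_instance

-- ===== CLAIM (what is proved, stated in full; the proofs are below) =====
def Claim_equal_splitbyblacket2 : Prop := ∀ (dic : List (String × String)), Dom_splitbyblacket2 dic → Pre_splitbyblacket2 dic → Spec_splitbyblacket2 dic (splitbyblacket2 dic)

-- ===== LEMMAS AND PROOFS =====

lemma mem_open_iff (c : Char) : c ∈ pvOpenB ↔ c ∈ pvBlacsA := by
  simp [pvOpenB, pvBlacsA]

lemma mem_close_iff (c : Char) : c ∈ pvCloseB ↔ c ∈ pvBlaceA := by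
  simp [pvCloseB, pvBlaceA]; tauto

lemma mem_blacA_iff (c : Char) : c ∈ pvBlacA ↔ c ∈ pvBlacsA ∨ c ∈ pvBlaceA := by
  simp [pvBlacA]

-- the loop invariant: A's fold with lookahead from position k equals B's buffered fold plus a final flush,
-- provided the pending buffer is empty whenever the next character is a bracket (or the text is over).
lemma loopA_eq (cs : List Char) (cs' : List Char) :
    ∀ (k : ℕ) (tl : List (List (String × String))) (idx : List Int) (tx : List Char),
    cs' = List.drop k cs →
    (match cs' with | [] => tx = [] | c :: _ => c ∈ pvBlacA → tx = []) →
    (List.foldl (pvStepA cs) (tl, idx, tx) (PySem.List.enumerate cs' (k : Int))).1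
      = pvFlushB (List.foldl pvStepB (tl, tx) cs').1 (List.foldl pvStepB (tl, tx) cs').2 := by
  induction cs' with
  | nil =>
    intro k tl idx tx _ hinv
    simp at hinv
    subst hinv
    simp [PySem.List.enumerate_nil, pvFlushB]
  | cons c rest IH =>
    intro k tl idx tx hdrop hinv
    have hlen : cs.length = k + rest.length + 1 := by
      have h1 : (List.drop k cs).length = cs.length - k := List.length_drop
      rw [← hdrop] at h1
      simp at h1
      omega
    have hnext : PySem.List.pyGet? cs ((k : Int) + 1) = rest.head? := by
      have : ((k : Int) + 1) = ((k + 1 : ℕ) : Int) := by push_cast; ring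
      rw [this, PySem.List.pyGet?_natCast]
      have h2 : cs[k + 1]? = (List.drop k cs)[1]? := by
        rw [List.getElem?_drop]
      rw [h2, ← hdrop]
      cases rest <;> simp
    have hdropsucc : rest = List.drop (k + 1) cs := by
      have : List.drop (k + 1) cs = (List.drop k cs).tail := by
        rw [← List.drop_drop]; simp
      rw [this, ← hdrop]; rfl
    rw [PySem.List.enumerate_cons]
    by_cases hs : c ∈ pvBlacsA
    · have htx : tx = [] := hinv ((mem_blacA_iff c).mpr (Or.inl hs))
      subst htx
      have hstepA : pvStepA cs (tl, idx, []) ((k : Int), c)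
          = (tl ++ [[("BL1", String.mk [c])]], idx ++ [(k : Int)], []) := by
        simp [pvStepA, hs]
      have hstepB : pvStepB (tl, []) c = (tl ++ [[("BL1", String.mk [c])]], []) := by
        simp [pvStepB, (mem_open_iff c).mpr hs, pvFlushB]
      rw [List.foldl_cons, hstepA, List.foldl_cons, hstepB]
      have : ((k : Int) + 1) = ((k + 1 : ℕ) : Int) := by push_cast; ring
      rw [this]
      exact IH (k + 1) _ _ [] hdropsucc (by cases rest <;> simp)
    · by_cases he : c ∈ pvBlaceA
      · have htx : tx = [] := hinv ((mem_blacA_iff c).mpr (Or.inr he))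
        subst htx
        have hstepA : pvStepA cs (tl, idx, []) ((k : Int), c)
            = (tl ++ [[("BL2", String.mk [c])]], idx ++ [(k : Int)], []) := by
          simp [pvStepA, hs, he]
        have hstepB : pvStepB (tl, []) c = (tl ++ [[("BL2", String.mk [c])]], []) := by
          simp [pvStepB, pvFlushB, (mem_close_iff c).mpr he]
          intro hc
          exact absurd ((mem_open_iff c).mp hc) hs
        rw [List.foldl_cons, hstepA, List.foldl_cons, hstepB]
        have : ((k : Int) + 1) = ((k + 1 : ℕ) : Int) := by push_cast; ring
        rw [this]
        exact IH (k + 1) _ _ [] hdropsucc (by cases rest <;> simp)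
      · -- non-bracket character
        have hnotO : c ∉ pvOpenB := fun hc => hs ((mem_open_iff c).mp hc)
        have hnotC : c ∉ pvCloseB := fun hc => he ((mem_close_iff c).mp hc)
        have hstepB : pvStepB (tl, tx) c = (tl, tx ++ [c]) := by
          simp [pvStepB, hnotO, hnotC]
        cases hrest : rest with
        | nil =>
          have hcond : ¬ ((k : Int) < (cs.length : Int) - 1) := by
            subst hrest; simp at hlen; omega
          have hstepA : pvStepA cs (tl, idx, tx) ((k : Int), c)
              = (tl ++ [[("TK", String.mk (tx ++ [c]))]], idx, tx ++ [c]) := by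
            simp [pvStepA, hs, he, hcond]
          rw [List.foldl_cons, hstepA, List.foldl_cons, hstepB]
          simp [PySem.List.enumerate_nil, pvFlushB]
        | cons c2 rest2 =>
          have hcond : (k : Int) < (cs.length : Int) - 1 := by
            subst hrest; simp at hlen; omega
          have hget : PySem.List.pyGet? cs ((k : Int) + 1) = some c2 := by
            rw [hnext, hrest]; rfl
          by_cases hc2 : c2 ∈ pvBlacA
          · have hstepA : pvStepA cs (tl, idx, tx) ((k : Int), c)
                = (tl ++ [[("TK", String.mk (tx ++ [c]))]], idx, []) := by
              simp [pvStepA, hs, he, hcond, hget, hc2]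
            rw [List.foldl_cons, hstepA, List.foldl_cons, hstepB]
            have : ((k : Int) + 1) = ((k + 1 : ℕ) : Int) := by push_cast; ring
            rw [this]
            have hIH := IH (k + 1) (tl ++ [[("TK", String.mk (tx ++ [c]))]]) idx []
              hdropsucc (by rw [hrest]; simp)
            rw [hrest] at hIH
            rw [hIH]
            -- one B-step on rest: at a bracket c2, B flushes the nonempty buffer tx ++ [c]
            have hbne : tx ++ [c] ≠ [] := by simp
            have hBstep : List.foldl pvStepB (tl, tx ++ [c]) (c2 :: rest2)
                = List.foldl pvStepB (tl ++ [[("TK", String.mk (tx ++ [c]))]], []) (c2 :: rest2) := by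
              rw [List.foldl_cons, List.foldl_cons]
              congr 1
              rcases (mem_blacA_iff c2).mp hc2 with h2 | h2
              · simp [pvStepB, (mem_open_iff c2).mpr h2, pvFlushB, hbne]
              · simp [pvStepB, pvFlushB, hbne, (mem_close_iff c2).mpr h2]
            rw [hBstep]
          · have hstepA : pvStepA cs (tl, idx, tx) ((k : Int), c)
                = (tl, idx, tx ++ [c]) := by
              simp [pvStepA, hs, he, hcond, hget, hc2]
            rw [List.foldl_cons, hstepA, List.foldl_cons, hstepB]
            have : ((k : Int) + 1) = ((k + 1 : ℕ) : Int) := by push_cast; ring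
            rw [this]
            have hIH := IH (k + 1) tl idx (tx ++ [c]) hdropsucc
              (by rw [hrest]; exact fun h => absurd h hc2)
            rw [hrest] at hIH
            exact hIH

-- ===== VERDICT (by name: the statement is the Claim_ definition above) =====
theorem splitbyblacket2_spec : Claim_equal_splitbyblacket2 := by
  intro dic _ _
  unfold Spec_splitbyblacket2 splitbyblacket2 splitbyblacket2_alt
  cases hv : PySem.List.pyGet? (PySem.Dict.ofList dic).values 0 with
  | none => rfl
  | some text =>
    have h := loopA_eq text.toList text.toList 0 [] [] [] (by simp)
      (by cases text.toList <;> simp)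
    simpa using h
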